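-- pv_equiv track=rewrite | github.com/kundor/MathFun | DattaGupta.py | dg_cond_b
-- ===== SOURCE A (Python) =====
-- def is_sublist(seq1, seq2):
--     """Does seq1 occur in cyclic order in seq2?"""
--     n, m = len(seq1), len(seq2)
--     for i in range(m):
--         for j in range(n):
--             if seq1[j] != seq2[(i+j) % m]:
--                 break
--         else:
--             return True
--     return False
--
-- def dg_cond_b(seq):
--     n = len(seq)
--     twoples = {(seq[i], seq[(i+1) % n]) for i in range(n)}
--     for x,y in twoples:
--         for w,z in twoples:
--             if y == w:
--                 if not is_sublist((x,y,z), seq):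
--                     return False
--     return True
-- ===== SOURCE B (Python) =====
-- def dg_cond_b(seq):
--     n = len(seq)
--     triples = {(seq[i], seq[(i + 1) % n], seq[(i + 2) % n]) for i in range(n)}
--     pairs = {(seq[i], seq[(i + 1) % n]) for i in range(n)}
--     succ = {}
--     for w, z in pairs:
--         succ.setdefault(w, []).append(z)
--     return all((x, y, z) in triples
--                for x, y in pairs
--                for z in succ.get(y, ()))
-- ===== Notes on version B (the rewrite author's own statement) =====
-- stated objective: alternative
-- what changed: Replaces the per-chained-pair cyclic is_sublist scan with membership in a precomputed set of consecutive cyclic triples, and replaces the inner scan over all pairs with a successor index keyed by the pair's first element.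
import Mathlib
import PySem

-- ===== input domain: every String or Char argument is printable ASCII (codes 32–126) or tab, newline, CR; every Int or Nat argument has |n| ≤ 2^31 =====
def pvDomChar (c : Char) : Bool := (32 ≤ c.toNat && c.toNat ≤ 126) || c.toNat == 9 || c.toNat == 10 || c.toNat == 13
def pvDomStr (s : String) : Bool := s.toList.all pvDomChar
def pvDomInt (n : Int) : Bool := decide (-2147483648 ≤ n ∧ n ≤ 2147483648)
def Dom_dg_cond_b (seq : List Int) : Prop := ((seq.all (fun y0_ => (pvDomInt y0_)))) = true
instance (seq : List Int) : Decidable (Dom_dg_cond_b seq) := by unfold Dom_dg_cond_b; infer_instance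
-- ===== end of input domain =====

-- B checks each chained pair against a precomputed set of consecutive cyclic triples,
-- indexed by a successor dictionary, instead of A's per-pair cyclic-sublist scan (objective: alternative).

-- ===== PORT A =====
-- literal port of is_sublist (break/else = inner all, outer any); indices are always in
-- range where it is called, so pyGetD with default 0 is exact
def pv_is_sublist (seq1 seq2 : List Int) : Bool :=
  let n : Int := seq1.length
  let m : Int := seq2.length
  (PySem.List.pyRange 0 m 1).any (fun i =>
    (PySem.List.pyRange 0 n 1).all (fun j =>
      PySem.List.pyGetD seq1 j 0 == PySem.List.pyGetD seq2 (PySem.Int.mod (i + j) m) 0))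

def dg_cond_b (seq : List Int) : Bool :=
  let n : Int := seq.length
  let twoples : PySem.Set (Int × Int) :=
    PySem.Set.ofList ((PySem.List.pyRange 0 n 1).map (fun i =>
      (PySem.List.pyGetD seq i 0, PySem.List.pyGetD seq (PySem.Int.mod (i + 1) n) 0)))
  -- 'for … return False … return True' over a set: an order-independent all
  twoples.all (fun xy =>
    twoples.all (fun wz =>
      if xy.2 == wz.1 then pv_is_sublist [xy.1, xy.2, wz.2] seq else true))

-- ===== PORT B =====
def dg_cond_b_alt (seq : List Int) : Bool :=
  let n : Int := seq.length
  let triples : PySem.Set (Int × Int × Int) :=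
    PySem.Set.ofList ((PySem.List.pyRange 0 n 1).map (fun i =>
      (PySem.List.pyGetD seq i 0, PySem.List.pyGetD seq (PySem.Int.mod (i + 1) n) 0,
       PySem.List.pyGetD seq (PySem.Int.mod (i + 2) n) 0)))
  let pairs : PySem.Set (Int × Int) :=
    PySem.Set.ofList ((PySem.List.pyRange 0 n 1).map (fun i =>
      (PySem.List.pyGetD seq i 0, PySem.List.pyGetD seq (PySem.Int.mod (i + 1) n) 0)))
  let succ : PySem.Dict Int (List Int) :=
    pairs.foldl (fun d wz => d.modify wz.1 [] (· ++ [wz.2])) PySem.Dict.empty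
  pairs.all (fun xy =>
    (succ.getD xy.2 []).all (fun z => triples.contains (xy.1, xy.2, z)))

-- ===== PRECONDITION & SPEC =====
def Spec_dg_cond_b (seq : List Int) (out : Bool) : Prop := out = dg_cond_b_alt seq
instance (seq : List Int) (out : Bool) : Decidable (Spec_dg_cond_b seq out) := by unfold Spec_dg_cond_b; infer_instance

-- ===== CLAIM (what is proved, stated in full; the proofs are below) =====
def Claim_equal_dg_cond_b : Prop := ∀ (seq : List Int), Dom_dg_cond_b seq → Spec_dg_cond_b seq (dg_cond_b seq)

-- ===== LEMMAS AND PROOFS =====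

theorem pv_mod_small (i m : Int) (h0 : 0 ≤ i) (h : i < m) : PySem.Int.mod i m = i := by
  rw [PySem.Int.mod_eq_emod_of_pos (by omega)]
  exact Int.emod_eq_of_lt h0 h

def pvTriples (seq : List Int) : List (Int × Int × Int) :=
  (PySem.List.pyRange 0 (seq.length : Int) 1).map (fun i =>
    (PySem.List.pyGetD seq i 0,
     PySem.List.pyGetD seq (PySem.Int.mod (i + 1) (seq.length : Int)) 0,
     PySem.List.pyGetD seq (PySem.Int.mod (i + 2) (seq.length : Int)) 0))

def pvPairs (seq : List Int) : List (Int × Int) :=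
  (PySem.List.pyRange 0 (seq.length : Int) 1).map (fun i =>
    (PySem.List.pyGetD seq i 0,
     PySem.List.pyGetD seq (PySem.Int.mod (i + 1) (seq.length : Int)) 0))

theorem pv_is_sublist_triple_iff (seq : List Int) (x y z : Int) :
    pv_is_sublist [x, y, z] seq = true ↔ (x, y, z) ∈ pvTriples seq := by
  unfold pv_is_sublist pvTriples
  have hl : (([x,y,z] : List Int).length : Int) = 3 := by simp
  rw [hl]
  have h3 : PySem.List.pyRange 0 3 1 = [0, 1, 2] := by decide
  have g0 : PySem.List.pyGetD [x,y,z] 0 0 = x := by simp [pysem]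
  have g1 : PySem.List.pyGetD [x,y,z] 1 0 = y := by simp [pysem]
  have g2 : PySem.List.pyGetD [x,y,z] 2 0 = z := by simp [pysem]
  simp only [h3, g0, g1, g2, List.any_eq_true, List.all_cons, List.all_nil,
    Bool.and_eq_true, Bool.and_true, beq_iff_eq, PySem.List.mem_pyRange_one,
    add_zero, List.mem_map, Prod.mk.injEq]
  constructor
  · rintro ⟨i, ⟨h0, hm⟩, hx, hy, hz⟩
    rw [pv_mod_small i _ h0 hm] at hx
    exact ⟨i, ⟨h0, hm⟩, hx.symm, hy.symm, hz.symm⟩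
  · rintro ⟨i, ⟨h0, hm⟩, hx, hy, hz⟩
    refine ⟨i, ⟨h0, hm⟩, ?_, hy.symm, hz.symm⟩
    rw [pv_mod_small i _ h0 hm]; exact hx.symm

theorem pv_succ_mem (P : List (Int × Int)) (y z : Int) :
    z ∈ (P.foldl (fun d wz => d.modify wz.1 [] (· ++ [wz.2])) PySem.Dict.empty).getD y []
      ↔ (y, z) ∈ P := by
  rw [show (P.foldl (fun d wz => d.modify wz.1 [] (· ++ [wz.2])) PySem.Dict.empty)
        = (P.foldl (fun d p => d.modify p.1 [] (· ++ [p.2])) PySem.Dict.empty) from rfl,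
     PySem.Dict.getD_foldl_modify_append]
  simp only [List.mem_append, List.mem_map, List.mem_filter, beq_iff_eq]
  constructor
  · rintro (h | ⟨p, ⟨hp, hp1⟩, hp2⟩)
    · simp at h
    · obtain ⟨p1, p2⟩ := p; subst hp1 hp2; exact hp
  · intro h; exact Or.inr ⟨(y, z), ⟨h, rfl⟩, rfl⟩

theorem dg_cond_b_eq (seq : List Int) : dg_cond_b seq = dg_cond_b_alt seq := by
  unfold dg_cond_b dg_cond_b_alt
  rw [Bool.eq_iff_iff]
  simp only [List.all_eq_true, PySem.Set.mem_ofList, PySem.Set.contains_iff]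
  constructor
  · intro hA xy hxy z hz
    have hp : (xy.2, z) ∈ pvPairs seq :=
      (PySem.Set.mem_ofList _ _).1 ((pv_succ_mem _ _ _).1 hz)
    have h := hA xy hxy (xy.2, z) hp
    rw [if_pos (by simp)] at h
    exact (pv_is_sublist_triple_iff seq xy.1 xy.2 z).1 h
  · intro hB xy hxy wz hwz
    by_cases hc : xy.2 = wz.1
    · rw [if_pos (by simpa using hc)]
      rw [pv_is_sublist_triple_iff]
      refine hB xy hxy wz.2 ((pv_succ_mem _ _ _).2 ((PySem.Set.mem_ofList _ _).2 ?_))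
      have : (xy.2, wz.2) = wz := by rw [hc]
      rw [this]; exact hwz
    · rw [if_neg (by simpa using hc)]

-- ===== VERDICT (by name: the statement is the Claim_ definition above) =====
theorem dg_cond_b_spec : Claim_equal_dg_cond_b := by
  intro seq _
  unfold Spec_dg_cond_b
  exact dg_cond_b_eq seq
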